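-- pv_equiv track=rewrite | github.com/Chadillac12/db | icd_common/schema.py | clean_header_name
-- ===== SOURCE A (Python) =====
-- from typing import Dict, Iterable, List, Mapping, MutableMapping, Sequence
--
-- def clean_header_name(name: str):
--     """
--     Clean noisy Excel headers by collapsing repeated words/phrases.
--
--     Mirrors the logic used by the diff tool so browser/diff share the same
--     normalization behavior.
--     """
--     if not name:
--         return name
--
--     tokens = str(name).strip().split()
--     n_tokens = len(tokens)
--     if n_tokens == 0:
--         return name
--
--     # Detect repeated phrases (e.g., "Name NAME" -> "Name").
--     for chunk_size in range(1, n_tokens // 2 + 1):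
--         if n_tokens % chunk_size != 0:
--             continue
--         chunks = [tokens[i : i + chunk_size] for i in range(0, n_tokens, chunk_size)]
--         first_norm = [x.lower() for x in chunks[0]]
--         if all([x.lower() for x in c] == first_norm for c in chunks[1:]):
--             return clean_header_name(" ".join(chunks[0]))
--
--     cleaned: List[str] = []
--     for token in tokens:
--         if not cleaned or cleaned[-1].lower() != token.lower():
--             cleaned.append(token)
--     return " ".join(cleaned)
-- ===== SOURCE B (Python) =====
-- def clean_header_name(name: str):
--     """Collapse repeated phrases and consecutive duplicate words in a header.
--
--     Single-pass strategy: lowercase every token once, find the smallest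
--     divisor-period of the token list directly with an index-mod check
--     (no chunk lists, no recursion -- one collapse provably suffices,
--     because the smallest period is itself aperiodic), then drop
--     consecutive case-insensitive duplicates and rejoin.
--     """
--     if not name:
--         return name
--     tokens = str(name).strip().split()
--     n = len(tokens)
--     if n == 0:
--         return name
--     low = [t.lower() for t in tokens]
--     for d in range(1, n // 2 + 1):
--         if n % d == 0 and all(low[i] == low[i % d] for i in range(n)):
--             tokens = tokens[:d]
--             low = low[:d]
--             break
--     out = []
--     prev = None
--     for t, l in zip(tokens, low):
--         if l != prev:
--             out.append(t)
--         prev = l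
--     return " ".join(out)
-- ===== Notes on version B (the rewrite author's own statement) =====
-- stated objective: alternative
-- what changed: Replaces A's recursion (which rebuilds chunk sublists and re-lowercases every token at each level) by a single collapse: lowercase each token once, find the smallest divisor-period with an index-mod comparison on the lowered list, truncate once (one collapse suffices because the smallest period is itself aperiodic), then dedup consecutive case-insensitive duplicates with a zipped prev-tracking pass.
import Mathlib
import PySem

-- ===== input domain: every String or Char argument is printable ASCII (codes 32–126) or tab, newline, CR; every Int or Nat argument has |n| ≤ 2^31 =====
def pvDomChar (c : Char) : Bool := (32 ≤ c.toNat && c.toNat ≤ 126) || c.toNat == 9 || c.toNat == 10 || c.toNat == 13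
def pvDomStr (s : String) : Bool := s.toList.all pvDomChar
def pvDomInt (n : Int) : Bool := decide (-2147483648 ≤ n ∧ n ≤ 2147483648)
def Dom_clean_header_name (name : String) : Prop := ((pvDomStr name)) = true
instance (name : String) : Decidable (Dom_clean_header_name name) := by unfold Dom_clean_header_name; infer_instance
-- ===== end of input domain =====

-- B replaces A's recursive chunk-list comparison by a single collapse: lowercase each
-- token once, find the smallest divisor-period with an index-mod check (one collapse
-- suffices because the smallest period is itself aperiodic), then dedup and rejoin.

-- ===== PORT A =====
-- chunks = [tokens[i:i+cs] for i in range(0, n, cs)]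
def cleanA_chunks (tokens : List String) (n : Nat) (cs : Int) : List (List String) :=
  (PySem.List.pyRange 0 n cs).map (fun i => PySem.List.slice tokens (some i) (some (i + cs)))

-- the 'for chunk_size in range(1, n//2+1)' loop, returning chunks[0] on the first hit
def cleanA_findSize (tokens : List String) (n : Nat) : List Int → Option (List String)
  | [] => none
  | cs :: rest =>
    if PySem.Int.mod n cs ≠ 0 then cleanA_findSize tokens n rest
    else
      if ((PySem.List.slice (cleanA_chunks tokens n cs) (some 1) none).all
            (fun c => c.map PySem.Str.lower == ((cleanA_chunks tokens n cs).headD []).map PySem.Str.lower))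
      then some ((cleanA_chunks tokens n cs).headD [])   -- chunks[0]; n ≥ 1 here so chunks ≠ []
      else cleanA_findSize tokens n rest

-- the 'cleaned' accumulation loop (cleaned[-1] ported as pyGet? cleaned (-1))
def cleanA_dedup (tokens : List String) : List String :=
  tokens.foldl (fun cleaned token =>
    if cleaned.isEmpty = true ∨ (PySem.List.pyGet? cleaned (-1)).map PySem.Str.lower ≠ some (PySem.Str.lower token)
    then cleaned ++ [token] else cleaned) []

-- fuel only makes the self-recursion structural; the wrapper's length+1 is never exhausted
def cleanA_go : Nat → String → String
  | 0, name => name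
  | fuel + 1, name =>
    if name = "" then name
    else
      if (PySem.Str.split₀ (PySem.Str.strip name)).length = 0 then name
      else
        match cleanA_findSize (PySem.Str.split₀ (PySem.Str.strip name))
                (PySem.Str.split₀ (PySem.Str.strip name)).length
                (PySem.List.pyRange 1 (PySem.Int.floordiv ((PySem.Str.split₀ (PySem.Str.strip name)).length : Int) 2 + 1) 1) with
        | some first => cleanA_go fuel (PySem.Str.join " " first)
        | none => PySem.Str.join " " (cleanA_dedup (PySem.Str.split₀ (PySem.Str.strip name)))

def clean_header_name (name : String) : String := cleanA_go (name.toList.length + 1) name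

-- ===== PORT B =====
-- all(low[i] == low[i % d] for i in range(n))
def cleanB_check (low : List String) (n : Nat) (d : Int) : Bool :=
  (PySem.List.pyRange 0 n 1).all fun i =>
    PySem.List.pyGet? low i == PySem.List.pyGet? low (PySem.Int.mod i d)

-- the 'for d in range(1, n//2+1): … break' scan, returning the first d that fits
def cleanB_find (low : List String) (n : Nat) : List Int → Option Int
  | [] => none
  | d :: rest =>
    if PySem.Int.mod (n : Int) d == 0 && cleanB_check low n d then some d
    else cleanB_find low n rest

-- the zip/prev dedup loop
def cleanB_dedup (pairs : List (String × String)) : List String :=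
  (pairs.foldl (fun (st : List String × Option String) tl =>
    (if st.2 ≠ some tl.2 then st.1 ++ [tl.1] else st.1, some tl.2)) ([], none)).1

def clean_header_name_alt (name : String) : String :=
  if name = "" then name
  else
    if (PySem.Str.split₀ (PySem.Str.strip name)).length = 0 then name
    else
      match cleanB_find ((PySem.Str.split₀ (PySem.Str.strip name)).map PySem.Str.lower)
              (PySem.Str.split₀ (PySem.Str.strip name)).length
              (PySem.List.pyRange 1 (PySem.Int.floordiv ((PySem.Str.split₀ (PySem.Str.strip name)).length : Int) 2 + 1) 1) with
      | some d =>
        PySem.Str.join " " (cleanB_dedup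
          ((PySem.List.slice (PySem.Str.split₀ (PySem.Str.strip name)) none (some d)).zip
           (PySem.List.slice ((PySem.Str.split₀ (PySem.Str.strip name)).map PySem.Str.lower) none (some d))))
      | none =>
        PySem.Str.join " " (cleanB_dedup
          ((PySem.Str.split₀ (PySem.Str.strip name)).zip
           ((PySem.Str.split₀ (PySem.Str.strip name)).map PySem.Str.lower)))

-- ===== PRECONDITION & SPEC =====
def Spec_clean_header_name (name : String) (out : String) : Prop := out = clean_header_name_alt name
instance (name : String) (out : String) : Decidable (Spec_clean_header_name name out) := by unfold Spec_clean_header_name; infer_instance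

-- ===== CLAIM (what is proved, stated in full; the proofs are below) =====
def Claim_equal_clean_header_name : Prop := ∀ (name : String), Dom_clean_header_name name → Spec_clean_header_name name (clean_header_name name)

-- ===== LEMMAS AND PROOFS =====

-- a token list is "clean" when every token is nonempty and whitespace-free
def CleanToks (ts : List (List Char)) : Prop :=
  ∀ t ∈ ts, t ≠ [] ∧ ∀ c ∈ t, PySem.Chars.isspace c = false

-- the lowered token list repeats with period d
def Periodic (L : List String) (d : Nat) : Prop :=
  ∀ i, i < L.length → L[i]? = L[i % d]?

theorem go_clean (s : List Char) : ∀ (cur : List Char) (acc : List (List Char)),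
    (∀ c ∈ cur, PySem.Chars.isspace c = false) →
    (∀ t ∈ acc, t ≠ [] ∧ ∀ c ∈ t, PySem.Chars.isspace c = false) →
    ∀ t ∈ PySem.Chars.split₀.go s cur acc, t ≠ [] ∧ ∀ c ∈ t, PySem.Chars.isspace c = false := by
  induction s with
  | nil =>
    intro cur acc hcur hacc t ht
    simp only [PySem.Chars.split₀.go] at ht
    split at ht
    · exact hacc t (by simpa using ht)
    · rename_i hcur_ne
      simp only [List.mem_reverse, List.mem_cons] at ht
      rcases ht with h | h
      · subst h
        refine ⟨by simpa using hcur_ne, ?_⟩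
        intro c hc; exact hcur c (List.mem_reverse.1 hc)
      · exact hacc t h
  | cons c rest ih =>
    intro cur acc hcur hacc t ht
    simp only [PySem.Chars.split₀.go] at ht
    by_cases hsp : PySem.Chars.isspace c = true
    · rw [if_pos hsp] at ht
      by_cases hemp : cur.isEmpty = true
      · rw [if_pos hemp] at ht
        exact ih [] acc (by simp) hacc t ht
      · rw [if_neg hemp] at ht
        refine ih [] (cur.reverse :: acc) (by simp) ?_ t ht
        intro u hu
        rcases List.mem_cons.1 hu with h | h
        · subst h
          refine ⟨by simpa using hemp, ?_⟩
          intro x hx; exact hcur x (List.mem_reverse.1 hx)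
        · exact hacc u h
    · rw [if_neg hsp] at ht
      refine ih (c :: cur) acc ?_ hacc t ht
      intro x hx
      rcases List.mem_cons.1 hx with h | h
      · subst h; simpa using hsp
      · exact hcur x h

theorem split₀_clean (cs : List Char) : CleanToks (PySem.Chars.split₀ cs) := by
  intro t ht
  exact go_clean cs [] [] (by simp) (by simp) t ht

theorem go_word (t : List Char) : ∀ (s cur : List Char) (acc : List (List Char)),
    (∀ c ∈ t, PySem.Chars.isspace c = false) →
    PySem.Chars.split₀.go (t ++ s) cur acc = PySem.Chars.split₀.go s (t.reverse ++ cur) acc := by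
  induction t with
  | nil => intro s cur acc _; simp
  | cons c t' ih =>
    intro s cur acc ht
    have hc : PySem.Chars.isspace c = false := ht c (by simp)
    have h1 : PySem.Chars.split₀.go (c :: (t' ++ s)) cur acc
        = PySem.Chars.split₀.go (t' ++ s) (c :: cur) acc := by
      simp only [PySem.Chars.split₀.go]
      rw [hc]
      simp
    rw [List.cons_append, h1, ih s (c :: cur) acc (fun x hx => ht x (by simp [hx]))]
    simp

theorem go_join : ∀ (ts : List (List Char)), CleanToks ts →
    ∀ acc, PySem.Chars.split₀.go (PySem.Chars.join [' '] ts) [] acc = acc.reverse ++ ts := by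
  intro ts
  induction ts with
  | nil =>
    intro _ acc
    rw [PySem.Chars.join_nil]
    simp [PySem.Chars.split₀.go]
  | cons t ts' ih =>
    intro h acc
    have htne : t ≠ [] := (h t (by simp)).1
    have htcl : ∀ c ∈ t, PySem.Chars.isspace c = false := (h t (by simp)).2
    cases ts' with
    | nil =>
      rw [PySem.Chars.join_singleton]
      have hw := go_word t [] [] acc htcl
      simp only [List.append_nil] at hw
      rw [hw]
      simp [PySem.Chars.split₀.go, htne]
    | cons u ts'' =>
      rw [PySem.Chars.join_cons_cons]
      have hw := go_word t (' ' :: PySem.Chars.join [' '] (u :: ts'')) [] acc htcl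
      simp only [List.append_nil] at hw
      rw [List.append_assoc, List.singleton_append, hw]
      have hsp : PySem.Chars.isspace ' ' = true := by decide
      have hne : (t.reverse).isEmpty = false := by simpa using htne
      have h2 : PySem.Chars.split₀.go (' ' :: PySem.Chars.join [' '] (u :: ts'')) t.reverse acc
          = PySem.Chars.split₀.go (PySem.Chars.join [' '] (u :: ts'')) [] (t.reverse.reverse :: acc) := by
        simp only [PySem.Chars.split₀.go]
        rw [hsp, hne]
        simp
      rw [h2]
      rw [List.reverse_reverse]
      rw [ih (fun x hx => h x (by simp [hx])) (t :: acc)]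
      simp

theorem resplit (ts : List (List Char)) (h : CleanToks ts) :
    PySem.Chars.split₀ (PySem.Chars.join [' '] ts) = ts := by
  show PySem.Chars.split₀.go (PySem.Chars.join [' '] ts) [] [] = ts
  rw [go_join ts h []]
  simp

theorem join_ne_nil (ts : List (List Char)) (h : CleanToks ts) (hne : ts ≠ []) :
    PySem.Chars.join [' '] ts ≠ [] := by
  cases ts with
  | nil => exact absurd rfl hne
  | cons t ts' =>
    have htne : t ≠ [] := (h t (by simp)).1
    cases ts' with
    | nil => rw [PySem.Chars.join_singleton]; exact htne
    | cons u ts'' =>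
      rw [PySem.Chars.join_cons_cons]
      simp [htne]

theorem join_last : ∀ (ts : List (List Char)), CleanToks ts → ts ≠ [] →
    ∃ c, (PySem.Chars.join [' '] ts).getLast? = some c ∧ PySem.Chars.isspace c = false := by
  intro ts
  induction ts with
  | nil => intro _ h; exact absurd rfl h
  | cons t ts' ih =>
    intro h _
    have htne : t ≠ [] := (h t (by simp)).1
    cases ts' with
    | nil =>
      rw [PySem.Chars.join_singleton]
      obtain ⟨c, hc⟩ := Option.isSome_iff_exists.1 (List.getLast?_isSome.2 htne)
      exact ⟨c, hc, (h t (by simp)).2 c (List.mem_of_getLast? hc)⟩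
    | cons u ts'' =>
      rw [PySem.Chars.join_cons_cons]
      have hJ : PySem.Chars.join [' '] (u :: ts'') ≠ [] :=
        join_ne_nil _ (fun x hx => h x (by simp [hx])) (by simp)
      obtain ⟨c, hc, hcs⟩ := ih (fun x hx => h x (by simp [hx])) (by simp)
      refine ⟨c, ?_, hcs⟩
      rw [List.append_assoc, List.getLast?_append_of_ne_nil _ (by simp),
          List.getLast?_append_of_ne_nil _ hJ]
      exact hc

theorem strip_join (ts : List (List Char)) (h : CleanToks ts) (hne : ts ≠ []) :
    PySem.Chars.strip (PySem.Chars.join [' '] ts) = PySem.Chars.join [' '] ts := by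
  obtain ⟨t, ts', rfl⟩ : ∃ t ts', ts = t :: ts' := by
    cases ts with
    | nil => exact absurd rfl hne
    | cons t ts' => exact ⟨t, ts', rfl⟩
  obtain ⟨c, tr, rfl⟩ : ∃ c tr, t = c :: tr := by
    rcases hcase : t with _ | ⟨c, tr⟩
    · exact absurd (hcase ▸ rfl) ((h t (by simp)).1)
    · exact ⟨c, tr, rfl⟩
  have hc : PySem.Chars.isspace c = false := (h (c :: tr) (by simp)).2 c (by simp)
  unfold PySem.Chars.strip
  have hl : PySem.Chars.lstrip (PySem.Chars.join [' '] ((c :: tr) :: ts'))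
      = PySem.Chars.join [' '] ((c :: tr) :: ts') := by
    have hhead : ∃ rest, PySem.Chars.join [' '] ((c :: tr) :: ts') = c :: rest := by
      cases ts' with
      | nil => exact ⟨tr, by rw [PySem.Chars.join_singleton]⟩
      | cons u ts'' =>
        refine ⟨tr ++ [' '] ++ PySem.Chars.join [' '] (u :: ts''), ?_⟩
        rw [PySem.Chars.join_cons_cons]
        simp
    obtain ⟨rest, hrest⟩ := hhead
    rw [hrest]
    unfold PySem.Chars.lstrip
    rw [List.dropWhile_cons]
    simp [hc]
  rw [hl]
  obtain ⟨d0, hd0, hd0s⟩ := join_last ((c :: tr) :: ts') h hne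
  unfold PySem.Chars.rstrip
  have hhead : (PySem.Chars.join [' '] ((c :: tr) :: ts')).reverse.head? = some d0 := by
    rw [List.head?_reverse]; exact hd0
  obtain ⟨rest, hrev⟩ : ∃ rest, (PySem.Chars.join [' '] ((c :: tr) :: ts')).reverse = d0 :: rest := by
    rcases hcase : (PySem.Chars.join [' '] ((c :: tr) :: ts')).reverse with _ | ⟨x, rest⟩
    · rw [hcase] at hhead; simp at hhead
    · rw [hcase] at hhead
      simp at hhead
      exact ⟨rest, by rw [hhead]⟩
  rw [hrev, List.dropWhile_cons]
  simp only [hd0s, Bool.false_eq_true, if_false]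
  rw [← hrev, List.reverse_reverse]

-- chunk condition ⟺ index-mod condition on the lowered list
theorem chunk_periodic (L : List String) (d k : Nat) (hd : 1 ≤ d) (hk : L.length = d * k) :
    (∀ j, j < k → (L.drop (d*j)).take d = L.take d) ↔ Periodic L d := by
  constructor
  · intro h i hi
    have hdpos : 0 < d := hd
    have hj : i / d < k := by
      have h1 : i < d * k := hk ▸ hi
      rw [Nat.div_lt_iff_lt_mul hdpos, Nat.mul_comm]
      exact h1
    have heq := h (i/d) hj
    have hidx : ((L.drop (d*(i/d))).take d)[i % d]? = (L.take d)[i % d]? := by rw [heq]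
    have hmod : i % d < d := Nat.mod_lt _ hdpos
    rw [List.getElem?_take, if_pos hmod, List.getElem?_drop, List.getElem?_take, if_pos hmod] at hidx
    rw [Nat.div_add_mod i d] at hidx
    exact hidx
  · intro h j hj
    apply List.ext_getElem?
    intro r
    by_cases hr : r < d
    · rw [List.getElem?_take, if_pos hr, List.getElem?_take, if_pos hr, List.getElem?_drop]
      have hi : d*j + r < L.length := by
        rw [hk]
        have h2 : d*j + d ≤ d*k := by
          calc d*j + d = d*(j+1) := by ring
            _ ≤ d*k := Nat.mul_le_mul_left _ (by omega)
        omega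
      have hper := h (d*j + r) hi
      rw [Nat.mul_add_mod, Nat.mod_eq_of_lt hr] at hper
      exact hper
    · rw [List.getElem?_take, if_neg hr, List.getElem?_take, if_neg hr]

theorem check_iff (L : List String) (n d : Nat) (hn : n = L.length) (_hd : 1 ≤ d) :
    cleanB_check L n (d : Int) = true ↔ Periodic L d := by
  subst hn
  unfold cleanB_check
  rw [List.all_eq_true]
  constructor
  · intro h i hi
    have hmem : ((i : Int)) ∈ PySem.List.pyRange 0 (L.length : Int) 1 :=
      PySem.List.mem_pyRange_one.2 ⟨by omega, by exact_mod_cast hi⟩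
    have hthis := h _ hmem
    rw [PySem.Int.mod_natCast] at hthis
    simp only [PySem.List.pyGet?_natCast, beq_iff_eq] at hthis
    exact hthis
  · intro h x hx
    obtain ⟨hx0, hxn⟩ := PySem.List.mem_pyRange_one.1 hx
    obtain ⟨i, rfl⟩ : ∃ i : Nat, x = (i : Int) := ⟨x.toNat, by omega⟩
    have hi : i < L.length := by exact_mod_cast hxn
    rw [PySem.Int.mod_natCast]
    simp only [PySem.List.pyGet?_natCast, beq_iff_eq]
    exact h i hi

theorem chunks_eq (tokens : List String) (d : Nat) (hd : 1 ≤ d) (hdvd : d ∣ tokens.length) :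
    cleanA_chunks tokens tokens.length (d : Int)
      = (List.range (tokens.length / d)).map (fun j => (tokens.drop (d*j)).take d) := by
  obtain ⟨k, hk⟩ := hdvd
  have hd0 : (0:Int) < (d : Int) := by exact_mod_cast hd
  unfold cleanA_chunks
  rw [PySem.List.pyRange_of_pos _ _ hd0]
  have hcount : (if (0:Int) < (tokens.length : Int) then (((tokens.length : Int) - 0 + (d:Int) - 1) / (d:Int)).toNat else 0) = tokens.length / d := by
    by_cases hn : tokens.length = 0
    · simp [hn]
    · rw [if_pos (by exact_mod_cast Nat.pos_of_ne_zero hn)]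
      have hrw : ((tokens.length : Int) - 0 + (d:Int) - 1) = ((d:Int) - 1) + (k:Int) * (d:Int) := by
        push_cast [hk]; ring
      rw [hrw, Int.add_mul_ediv_right _ _ (by omega : (d:Int) ≠ 0),
          Int.ediv_eq_zero_of_lt (by omega) (by omega)]
      have hq : tokens.length / d = k := by
        rw [hk]; exact Nat.mul_div_cancel_left k (by omega)
      rw [hq]
      simp
  rw [hcount, List.map_map]
  apply List.map_congr_left
  intro j _
  simp only [Function.comp]
  rw [show ((0:Int) + (d:Int) * (j:Int)) = ((d*j : Nat) : Int) by push_cast; ring]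
  exact PySem.List.slice_natCast_add tokens (d*j) d

theorem testA_eq (tokens : List String) (d : Nat) (hd : 1 ≤ d) (hdvd : d ∣ tokens.length) :
    ((PySem.List.slice (cleanA_chunks tokens tokens.length (d:Int)) (some 1) none).all
        (fun c => c.map PySem.Str.lower == ((cleanA_chunks tokens tokens.length (d:Int)).headD []).map PySem.Str.lower))
      = cleanB_check (tokens.map PySem.Str.lower) tokens.length (d:Int) := by
  obtain ⟨k, hk⟩ := hdvd
  have hL : (tokens.map PySem.Str.lower).length = tokens.length := by simp
  rw [Bool.eq_iff_iff]
  rw [check_iff (tokens.map PySem.Str.lower) tokens.length d hL.symm hd]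
  rw [chunks_eq tokens d hd ⟨k, hk⟩]
  rw [PySem.List.slice_from _ (by omega : (0:Int) ≤ 1)]
  have hkd : tokens.length / d = k := by rw [hk]; exact Nat.mul_div_cancel_left k (by omega)
  rw [hkd]
  cases k with
  | zero =>
    have hn0 : tokens.length = 0 := by omega
    constructor
    · intro _ i hi
      rw [hL, hn0] at hi; omega
    · intro _
      simp
  | succ m =>
    rw [List.range_succ_eq_map, List.map_cons, List.map_map]
    have htoNat : ((1:Int)).toNat = 1 := rfl
    rw [htoNat]
    simp only [List.drop_succ_cons, List.drop_zero, List.headD_cons]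
    rw [List.all_eq_true]
    have hmaps : ∀ a : Nat, ((tokens.drop a).take d).map PySem.Str.lower
        = ((tokens.map PySem.Str.lower).drop a).take d := by
      intro a; rw [List.map_take, List.map_drop]
    have hstep : (∀ x ∈ (List.range m).map ((fun j => (tokens.drop (d*j)).take d) ∘ (fun i => i + 1)),
          (x.map PySem.Str.lower == ((tokens.drop (d*0)).take d).map PySem.Str.lower) = true)
        ↔ ∀ j, j < m → ((tokens.map PySem.Str.lower).drop (d*(j+1))).take d
            = (tokens.map PySem.Str.lower).take d := by
      constructor
      · intro h j hj
        have h1 := h _ (List.mem_map.2 ⟨j, List.mem_range.2 hj, rfl⟩)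
        simp only [Function.comp] at h1
        rw [beq_iff_eq, hmaps, hmaps] at h1
        simpa using h1
      · intro h x hx
        obtain ⟨j, hj, rfl⟩ := List.mem_map.1 hx
        simp only [Function.comp]
        rw [beq_iff_eq, hmaps, hmaps]
        have h1 := h j (List.mem_range.1 hj)
        simpa using h1
    rw [hstep]
    have hshift : (∀ j, j < m → ((tokens.map PySem.Str.lower).drop (d*(j+1))).take d
            = (tokens.map PySem.Str.lower).take d)
        ↔ ∀ j, j < m+1 → ((tokens.map PySem.Str.lower).drop (d*j)).take d
            = (tokens.map PySem.Str.lower).take d := by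
      constructor
      · intro h j hj
        cases j with
        | zero => simp
        | succ jj => exact h jj (by omega)
      · intro h j hj
        exact h (j+1) (by omega)
    rw [hshift]
    exact chunk_periodic (tokens.map PySem.Str.lower) d (m+1) hd (by rw [hL, hk])

theorem find_eq (tokens : List String) : ∀ (cs : List Int),
    (∀ c ∈ cs, 1 ≤ c) →
    cleanA_findSize tokens tokens.length cs
      = (cleanB_find (tokens.map PySem.Str.lower) tokens.length cs).map
          (fun d => tokens.take d.toNat) := by
  intro cs
  induction cs with
  | nil => intro _; rfl
  | cons c rest ih =>
    intro hcs
    have hc1 : 1 ≤ c := hcs c (by simp)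
    obtain ⟨d, rfl⟩ : ∃ d : Nat, c = (d : Int) := ⟨c.toNat, by omega⟩
    have hd1 : 1 ≤ d := by exact_mod_cast hc1
    simp only [cleanA_findSize, cleanB_find]
    rw [PySem.Int.mod_natCast]
    by_cases hdvd : tokens.length % d = 0
    · rw [hdvd]
      rw [if_neg (by simp)]
      have hdd : d ∣ tokens.length := Nat.dvd_of_mod_eq_zero hdvd
      rw [testA_eq tokens d hd1 hdd]
      by_cases hchk : cleanB_check (tokens.map PySem.Str.lower) tokens.length (d:Int) = true
      case neg =>
        rw [if_neg hchk, if_neg (by simp only [Bool.and_eq_true]; intro hcon; exact hchk hcon.2)]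
        exact ih (fun x hx => hcs x (by simp [hx]))
      case pos =>
        rw [if_pos hchk, if_pos (by simp [hchk])]
        simp only [Option.map_some]
        congr 1
        rw [chunks_eq tokens d hd1 hdd]
        obtain ⟨k, hk⟩ := hdd
        have hkd : tokens.length / d = k := by
          rw [hk]; exact Nat.mul_div_cancel_left k (by omega)
        cases k with
        | zero =>
          have hn0 : tokens.length = 0 := by omega
          have hnil : tokens = [] := List.eq_nil_of_length_eq_zero hn0
          simp [hnil]
        | succ m =>
          rw [hkd, List.range_succ_eq_map, List.map_cons]
          simp
    · have hne : ((tokens.length % d : Nat) : Int) ≠ 0 := by exact_mod_cast hdvd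
      rw [if_pos hne]
      rw [if_neg (by
        simp only [Bool.and_eq_true, beq_iff_eq]
        intro hcon
        exact absurd (by exact_mod_cast hcon.1) hdvd)]
      exact ih (fun x hx => hcs x (by simp [hx]))

theorem find_some (L : List String) (n : Nat) : ∀ (cs : List Int) (d : Int),
    cs.Pairwise (· < ·) →
    cleanB_find L n cs = some d →
    d ∈ cs ∧ (PySem.Int.mod (n:Int) d == 0 && cleanB_check L n d) = true ∧
      ∀ e ∈ cs, e < d → (PySem.Int.mod (n:Int) e == 0 && cleanB_check L n e) = false := by
  intro cs
  induction cs with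
  | nil => intro d _ h; simp [cleanB_find] at h
  | cons c rest ih =>
    intro d hpw h
    simp only [cleanB_find] at h
    by_cases hg : (PySem.Int.mod (n:Int) c == 0 && cleanB_check L n c) = true
    · rw [if_pos hg] at h
      have hcd : c = d := by injection h
      subst hcd
      refine ⟨by simp, hg, ?_⟩
      intro e he hlt
      rcases List.mem_cons.1 he with rfl | hmem
      · omega
      · have := (List.pairwise_cons.1 hpw).1 e hmem
        omega
    · rw [if_neg hg] at h
      obtain ⟨hmem, hguard, hmin⟩ := ih d (List.pairwise_cons.1 hpw).2 h
      refine ⟨by simp [hmem], hguard, ?_⟩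
      intro e he hlt
      rcases List.mem_cons.1 he with rfl | hm
      · exact Bool.eq_false_iff.2 hg
      · exact hmin e hm hlt

theorem floordiv_two_natCast (d : Nat) : PySem.Int.floordiv (d : Int) 2 = ((d / 2 : Nat) : Int) := by
  have h := PySem.Int.floordiv_natCast d 2
  exact_mod_cast h

theorem inner_find_none (L : List String) (n d : Nat) (hnL : n = L.length) (hd : 1 ≤ d) (hdvd : d ∣ n)
    (hfind : cleanB_find L n (PySem.List.pyRange 1 (PySem.Int.floordiv (n:Int) 2 + 1) 1) = some (d:Int)) :
    cleanB_find (L.take d) d (PySem.List.pyRange 1 (PySem.Int.floordiv (d:Int) 2 + 1) 1) = none := by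
  obtain ⟨hmemd, hguardd, hmind⟩ := find_some L n _ _ (PySem.List.pairwise_lt_pyRange_one _ _) hfind
  have hdn : d ≤ n := by
    obtain ⟨_, h2⟩ := PySem.List.mem_pyRange_one.1 hmemd
    rw [floordiv_two_natCast] at h2
    have h3 : d ≤ n / 2 := by exact_mod_cast (by omega : (d:Int) ≤ ((n/2 : Nat) : Int))
    have h4 := Nat.div_le_self n 2
    omega
  rw [Bool.and_eq_true] at hguardd
  obtain ⟨_, hchkd⟩ := hguardd
  have hperd : Periodic L d := (check_iff L n d hnL hd).1 hchkd
  cases hcase : cleanB_find (L.take d) d (PySem.List.pyRange 1 (PySem.Int.floordiv (d:Int) 2 + 1) 1) with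
  | none => rfl
  | some f =>
    exfalso
    obtain ⟨hmemf, hguardf, _⟩ := find_some (L.take d) d _ _ (PySem.List.pairwise_lt_pyRange_one _ _) hcase
    obtain ⟨hf1, hf2⟩ := PySem.List.mem_pyRange_one.1 hmemf
    obtain ⟨g, rfl⟩ : ∃ g : Nat, f = (g : Int) := ⟨f.toNat, by omega⟩
    have hg1 : 1 ≤ g := by exact_mod_cast hf1
    rw [floordiv_two_natCast] at hf2
    have hg2 : g ≤ d / 2 := by exact_mod_cast (by omega : (g:Int) ≤ ((d/2 : Nat):Int))
    rw [Bool.and_eq_true] at hguardf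
    obtain ⟨hmodf, hchkf⟩ := hguardf
    have hgd : g ∣ d := by
      rw [PySem.Int.mod_natCast] at hmodf
      exact Nat.dvd_of_mod_eq_zero (by exact_mod_cast (beq_iff_eq.1 hmodf))
    have hdL : d ≤ L.length := by omega
    have hlen_take : (L.take d).length = d := by rw [List.length_take]; omega
    have hperf : Periodic (L.take d) g := (check_iff (L.take d) d g hlen_take.symm hg1).1 hchkf
    have hperLg : Periodic L g := by
      intro i hi
      have h1 : L[i]? = L[i % d]? := hperd i hi
      have himd : i % d < d := Nat.mod_lt _ (by omega)
      have h2 : (L.take d)[i % d]? = L[i % d]? := by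
        rw [List.getElem?_take, if_pos himd]
      have h3 : (L.take d)[i % d]? = (L.take d)[(i % d) % g]? := by
        have h5 := hperf (i % d) (by rw [hlen_take]; exact himd)
        exact h5
      have hmm : (i % d) % g = i % g := Nat.mod_mod_of_dvd i hgd
      have himg : i % g < d := by
        have h6 : i % g < g := Nat.mod_lt _ (by omega)
        omega
      have h4 : (L.take d)[(i % d) % g]? = L[i % g]? := by
        rw [hmm, List.getElem?_take, if_pos himg]
      rw [h1, ← h2, h3, h4]
    have hgn : g ∣ n := hgd.trans hdvd
    have hgmem : (g : Int) ∈ PySem.List.pyRange 1 (PySem.Int.floordiv (n:Int) 2 + 1) 1 := by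
      apply PySem.List.mem_pyRange_one.2
      constructor
      · exact_mod_cast hg1
      · rw [floordiv_two_natCast]
        have h7 : g ≤ n / 2 := le_trans hg2 (Nat.div_le_div_right hdn)
        have h8 : (g:Int) ≤ ((n/2 : Nat):Int) := by exact_mod_cast h7
        omega
    have hglt : (g:Int) < (d:Int) := by
      have h9 : g < d := lt_of_le_of_lt hg2 (Nat.div_lt_self (by omega) (by omega))
      exact_mod_cast h9
    have hgguard := hmind (g:Int) hgmem hglt
    have hgtrue : (PySem.Int.mod (n:Int) (g:Int) == 0 && cleanB_check L n (g:Int)) = true := by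
      rw [Bool.and_eq_true]
      constructor
      · rw [PySem.Int.mod_natCast]
        have h10 : n % g = 0 := Nat.mod_eq_zero_of_dvd hgn
        rw [h10]
        simp
      · exact (check_iff L n g hnL hg1).2 hperLg
    rw [hgguard] at hgtrue
    exact absurd hgtrue (by simp)

theorem dedup_fold (tokens : List String) : ∀ (acc : List String),
    tokens.foldl (fun cleaned token =>
        if cleaned.isEmpty = true ∨ (PySem.List.pyGet? cleaned (-1)).map PySem.Str.lower ≠ some (PySem.Str.lower token)
        then cleaned ++ [token] else cleaned) acc
      = ((tokens.zip (tokens.map PySem.Str.lower)).foldl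
          (fun (st : List String × Option String) tl =>
            (if st.2 ≠ some tl.2 then st.1 ++ [tl.1] else st.1, some tl.2))
          (acc, acc.getLast?.map PySem.Str.lower)).1 := by
  induction tokens with
  | nil => intro acc; rfl
  | cons t ts ih =>
    intro acc
    simp only [List.map_cons, List.zip_cons_cons, List.foldl_cons]
    have hcond : (acc.isEmpty = true ∨ (PySem.List.pyGet? acc (-1)).map PySem.Str.lower ≠ some (PySem.Str.lower t))
        ↔ acc.getLast?.map PySem.Str.lower ≠ some (PySem.Str.lower t) := by
      cases acc with
      | nil => simp
      | cons a as =>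
        rw [PySem.List.pyGet?_neg_one]
        simp
    by_cases hA : acc.getLast?.map PySem.Str.lower ≠ some (PySem.Str.lower t)
    · rw [if_pos (hcond.2 hA), if_pos hA]
      have hlast : (acc ++ [t]).getLast?.map PySem.Str.lower = some (PySem.Str.lower t) := by
        rw [List.getLast?_concat]; rfl
      rw [ih (acc ++ [t]), hlast]
    · rw [if_neg (fun h => hA (hcond.1 h)), if_neg hA]
      rw [not_ne_iff] at hA
      rw [ih acc, hA]

theorem dedup_eq (tokens : List String) :
    cleanA_dedup tokens = cleanB_dedup (tokens.zip (tokens.map PySem.Str.lower)) := by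
  unfold cleanA_dedup cleanB_dedup
  have h := dedup_fold tokens []
  simpa using h

theorem goA_succ (fuel : Nat) (name : String) :
    cleanA_go (fuel + 1) name =
      (if name = "" then name
       else
         if (PySem.Str.split₀ (PySem.Str.strip name)).length = 0 then name
         else
           match cleanA_findSize (PySem.Str.split₀ (PySem.Str.strip name))
                   (PySem.Str.split₀ (PySem.Str.strip name)).length
                   (PySem.List.pyRange 1 (PySem.Int.floordiv ((PySem.Str.split₀ (PySem.Str.strip name)).length : Int) 2 + 1) 1) with
           | some first => cleanA_go fuel (PySem.Str.join " " first)
           | none => PySem.Str.join " " (cleanA_dedup (PySem.Str.split₀ (PySem.Str.strip name)))) := rfl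

theorem go_eq_alt (name : String) (f2 : Nat) : cleanA_go (f2 + 2) name = clean_header_name_alt name := by
  by_cases h0 : name = ""
  · subst h0
    show cleanA_go ((f2 + 1) + 1) "" = clean_header_name_alt ""
    rw [goA_succ, if_pos rfl]
    unfold clean_header_name_alt
    rw [if_pos rfl]
  · have hsplit : PySem.Str.split₀ (PySem.Str.strip name)
        = (PySem.Chars.split₀ (PySem.Chars.strip name.toList)).map String.ofList := by
      rw [PySem.Str.split₀.eq_1, PySem.Str.toList_strip]
    have hclean : CleanToks (PySem.Chars.split₀ (PySem.Chars.strip name.toList)) := split₀_clean _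
    show cleanA_go ((f2 + 1) + 1) name = clean_header_name_alt name
    rw [goA_succ]
    unfold clean_header_name_alt
    rw [if_neg h0, if_neg h0]
    by_cases hn : (PySem.Str.split₀ (PySem.Str.strip name)).length = 0
    · rw [if_pos hn, if_pos hn]
    · rw [if_neg hn, if_neg hn]
      have hcands1 : ∀ c ∈ PySem.List.pyRange 1 (PySem.Int.floordiv (((PySem.Str.split₀ (PySem.Str.strip name)).length : Nat) : Int) 2 + 1) 1, 1 ≤ c :=
        fun c hc => (PySem.List.mem_pyRange_one.1 hc).1
      rw [find_eq _ _ hcands1]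
      cases hB : cleanB_find ((PySem.Str.split₀ (PySem.Str.strip name)).map PySem.Str.lower)
          (PySem.Str.split₀ (PySem.Str.strip name)).length
          (PySem.List.pyRange 1 (PySem.Int.floordiv (((PySem.Str.split₀ (PySem.Str.strip name)).length : Nat) : Int) 2 + 1) 1) with
      | none =>
        simp only [Option.map_none]
        rw [dedup_eq]
      | some e =>
        obtain ⟨hmem, hguard, hmin⟩ := find_some _ _ _ _ (PySem.List.pairwise_lt_pyRange_one _ _) hB
        obtain ⟨h1e, _⟩ := PySem.List.mem_pyRange_one.1 hmem
        obtain ⟨d, rfl⟩ : ∃ d : Nat, e = (d : Int) := ⟨e.toNat, by omega⟩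
        have hd1 : 1 ≤ d := by exact_mod_cast h1e
        rw [Bool.and_eq_true] at hguard
        obtain ⟨hmod, hchk⟩ := hguard
        have hdvd : d ∣ (PySem.Str.split₀ (PySem.Str.strip name)).length := by
          rw [PySem.Int.mod_natCast] at hmod
          exact Nat.dvd_of_mod_eq_zero (by exact_mod_cast (beq_iff_eq.1 hmod))
        have hnpos : 0 < (PySem.Str.split₀ (PySem.Str.strip name)).length := Nat.pos_of_ne_zero hn
        have hdn : d ≤ (PySem.Str.split₀ (PySem.Str.strip name)).length := Nat.le_of_dvd hnpos hdvd
        simp only [Option.map_some, Int.toNat_natCast]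
        rw [PySem.List.slice_to _ (by omega : (0:Int) ≤ (d:Int)),
            PySem.List.slice_to _ (by omega : (0:Int) ≤ (d:Int))]
        rw [Int.toNat_natCast]
        have hcl' : CleanToks ((PySem.Chars.split₀ (PySem.Chars.strip name.toList)).take d) :=
          fun t ht => hclean t (List.mem_of_mem_take ht)
        have hctlen : (PySem.Chars.split₀ (PySem.Chars.strip name.toList)).length
            = (PySem.Str.split₀ (PySem.Str.strip name)).length := by rw [hsplit]; simp
        have hne' : (PySem.Chars.split₀ (PySem.Chars.strip name.toList)).take d ≠ [] := by
          have hlt : ((PySem.Chars.split₀ (PySem.Chars.strip name.toList)).take d).length = d := by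
            rw [List.length_take]; omega
          intro hnil
          rw [hnil] at hlt
          simp at hlt
          omega
        have htake : (PySem.Str.split₀ (PySem.Str.strip name)).take d
            = ((PySem.Chars.split₀ (PySem.Chars.strip name.toList)).take d).map String.ofList := by
          rw [hsplit, List.map_take]
        have hjoinTl : (PySem.Str.join " " ((PySem.Str.split₀ (PySem.Str.strip name)).take d)).toList
            = PySem.Chars.join [' '] ((PySem.Chars.split₀ (PySem.Chars.strip name.toList)).take d) := by
          rw [PySem.Str.toList_join, htake, List.map_map]
          have hco : String.toList ∘ String.ofList = id := by
            funext l; simp [Function.comp, String.toList_ofList]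
          rw [hco, List.map_id]
          rfl
        have hjoin_ne : PySem.Str.join " " ((PySem.Str.split₀ (PySem.Str.strip name)).take d) ≠ "" := by
          intro h
          have hnil : (PySem.Str.join " " ((PySem.Str.split₀ (PySem.Str.strip name)).take d)).toList = [] := by
            rw [h]; rfl
          rw [hjoinTl] at hnil
          exact join_ne_nil _ hcl' hne' hnil
        have hresplit : PySem.Str.split₀ (PySem.Str.strip (PySem.Str.join " " ((PySem.Str.split₀ (PySem.Str.strip name)).take d)))
            = (PySem.Str.split₀ (PySem.Str.strip name)).take d := by
          rw [PySem.Str.split₀.eq_1, PySem.Str.toList_strip, hjoinTl,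
              strip_join _ hcl' hne', resplit _ hcl', ← htake]
        show cleanA_go (f2 + 1) (PySem.Str.join " " ((PySem.Str.split₀ (PySem.Str.strip name)).take d)) = _
        rw [goA_succ, if_neg hjoin_ne]
        rw [hresplit]
        have hlen' : ((PySem.Str.split₀ (PySem.Str.strip name)).take d).length = d := by
          rw [List.length_take]; omega
        rw [hlen']
        rw [if_neg (by omega : ¬ d = 0)]
        have hcands1' : ∀ c ∈ PySem.List.pyRange 1 (PySem.Int.floordiv ((d : Nat) : Int) 2 + 1) 1, 1 ≤ c :=
          fun c hc => (PySem.List.mem_pyRange_one.1 hc).1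
        have hfind_eq' := find_eq ((PySem.Str.split₀ (PySem.Str.strip name)).take d) _ hcands1'
        rw [hlen'] at hfind_eq'
        rw [hfind_eq']
        have hmaplow : ((PySem.Str.split₀ (PySem.Str.strip name)).take d).map PySem.Str.lower
            = ((PySem.Str.split₀ (PySem.Str.strip name)).map PySem.Str.lower).take d := by
          rw [List.map_take]
        rw [hmaplow]
        rw [inner_find_none ((PySem.Str.split₀ (PySem.Str.strip name)).map PySem.Str.lower)
              (PySem.Str.split₀ (PySem.Str.strip name)).length d (by simp) hd1 hdvd hB]
        simp only [Option.map_none]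
        rw [dedup_eq, hmaplow]

-- ===== VERDICT (by name: the statement is the Claim_ definition above) =====
theorem clean_header_name_spec : Claim_equal_clean_header_name := by
  intro name _
  show clean_header_name name = clean_header_name_alt name
  by_cases h0 : name = ""
  · subst h0; rfl
  · unfold clean_header_name
    have hlen : 1 ≤ name.toList.length := by
      rcases hcase : name.toList with _ | ⟨c, rest⟩
      · exfalso
        apply h0
        have h := congrArg String.ofList hcase
        rwa [String.ofList_toList] at h
      · simp
    obtain ⟨m, hm⟩ : ∃ m, name.toList.length = m + 1 := ⟨name.toList.length - 1, by omega⟩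
    rw [hm]
    exact go_eq_alt name m
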